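-- pv_equiv track=rewrite | github.com/mrpara/bot-battle-board | interpreter.py | parse
-- ===== SOURCE A (Python) =====
-- def parse(expr):
--     # Initial parsing for expression; strip off leading and trailing whitespaces, replace multiple spaces with
--     # singles, and separate into different commands on whitespace or linebreak if not enclosed within parentheses
--     expr_parsed = ' '.join(expr.split()).replace("\n", " ").replace("\t", " ")
--     par = 0
--     token = ""
--     expr_sep = []
--     for char in expr_parsed:
--         if par == 0 and char == " ":
--             expr_sep.append(token)
--             token = ""
--         else:
--             if char == ")":
--                 par -= 1
--             token += char
--             if char == "(":
--                 par += 1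
--
--     if token != "":
--         expr_sep.append(token)
--
--     return expr_sep
-- ===== SOURCE B (Python) =====
-- def _split_first(s):
--     """Split s at the first space seen at parenthesis depth 0, or return None."""
--     bal = 0
--     for i, c in enumerate(s):
--         if bal == 0 and c == ' ':
--             return s[:i], s[i + 1:]
--         if c == '(':
--             bal += 1
--         if c == ')':
--             bal -= 1
--     return None
--
--
-- def parse(expr):
--     # Normalize whitespace once, then repeatedly cut off the head token at the
--     # first depth-0 space instead of accumulating characters one by one.
--     s = ' '.join(expr.split())
--     out = []
--     while True:
--         parts = _split_first(s)
--         if parts is None: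
--             if s:
--                 out.append(s)
--             return out
--         head, s = parts
--         out.append(head)
-- ===== Notes on version B (the rewrite author's own statement) =====
-- stated objective: alternative
-- what changed: A accumulates characters one at a time into a token with a single stateful fold; B repeatedly locates the first depth-0 space, slices the head token off and loops on the remainder (and drops A's no-op replace calls).
import Mathlib
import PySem

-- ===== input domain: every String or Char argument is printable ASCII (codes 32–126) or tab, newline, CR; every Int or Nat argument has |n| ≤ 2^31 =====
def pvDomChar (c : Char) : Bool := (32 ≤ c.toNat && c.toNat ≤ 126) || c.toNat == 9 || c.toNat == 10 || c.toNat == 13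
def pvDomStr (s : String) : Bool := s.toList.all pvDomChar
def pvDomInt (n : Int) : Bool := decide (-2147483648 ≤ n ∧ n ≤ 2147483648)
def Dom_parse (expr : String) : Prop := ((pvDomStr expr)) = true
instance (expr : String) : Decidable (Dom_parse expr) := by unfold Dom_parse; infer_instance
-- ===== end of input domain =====

-- B replaces A's character-by-character accumulator fold by repeatedly cutting the head token
-- at the first depth-0 space (objective: alternative decomposition, same linear cost).


-- ===== PORT A =====
-- A: normalize whitespace, then one pass with state (par, token, expr_sep);
-- the trailing token is appended when nonempty.
def parseLoop : Int → List Char → List String → List Char → (Int × List Char × List String)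
  | par, tok, acc, [] => (par, tok, acc)
  | par, tok, acc, c :: rest =>
    if par == 0 && c == ' ' then
      parseLoop par [] (acc ++ [String.ofList tok]) rest
    else
      let par1 := if c == ')' then par - 1 else par
      let tok1 := tok ++ [c]
      let par2 := if c == '(' then par1 + 1 else par1
      parseLoop par2 tok1 acc rest

def parse (expr : String) : List String :=
  let exprParsed := PySem.Str.replace (PySem.Str.replace
      (PySem.Str.join " " (PySem.Str.split₀ expr)) "\n" " ") "\t" " "
  let st := parseLoop 0 [] [] exprParsed.toList
  if st.2.1.isEmpty then st.2.2 else st.2.2 ++ [String.ofList st.2.1]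

-- ===== PORT B =====
-- B helper: index of the first space at parenthesis depth 0 (the for-loop of _split_first)
def splitFirstGo : Int → Nat → List Char → Option Nat
  | _, _, [] => none
  | bal, i, c :: rest =>
    if bal == 0 && c == ' ' then some i
    else
      let bal1 := if c == '(' then bal + 1 else bal
      let bal2 := if c == ')' then bal1 - 1 else bal1
      splitFirstGo bal2 (i + 1) rest

-- _split_first: (s[:i], s[i+1:]) at that index, or None
def splitFirst (s : List Char) : Option (List Char × List Char) :=
  match splitFirstGo 0 0 s with
  | none => none
  | some i => some (s.take i, s.drop (i + 1))

-- termination fact for the while-loop: the remainder returned by _split_first is shorter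
theorem splitFirstGo_isSome_ne_nil {bal : Int} {i j : Nat} {s : List Char}
    (h : splitFirstGo bal i s = some j) : s ≠ [] := by
  intro hs; subst hs; simp [splitFirstGo] at h

theorem splitFirst_length_lt {s hd t} (h : splitFirst s = some (hd, t)) :
    t.length < s.length := by
  unfold splitFirst at h
  cases hg : splitFirstGo 0 0 s with
  | none => rw [hg] at h; simp at h
  | some j =>
    rw [hg] at h
    have hne : s ≠ [] := splitFirstGo_isSome_ne_nil hg
    have hlen : 0 < s.length := List.length_pos_iff.mpr hne
    simp only [Option.some.injEq, Prod.mk.injEq] at h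
    have : t = s.drop (j + 1) := h.2.symm
    subst this
    simp [List.length_drop]
    omega

-- the while-loop of parse
def tokensLoop (out : List String) (s : List Char) : List String :=
  match h : splitFirst s with
  | none => if s.isEmpty then out else out ++ [String.ofList s]
  | some (hd, rest) => tokensLoop (out ++ [String.ofList hd]) rest
termination_by s.length
decreasing_by exact splitFirst_length_lt h

def parse_alt (expr : String) : List String :=
  tokensLoop [] (PySem.Str.join " " (PySem.Str.split₀ expr)).toList

-- ===== PRECONDITION & SPEC =====
def Spec_parse (expr : String) (out : List String) : Prop := out = parse_alt expr
instance (expr : String) (out : List String) : Decidable (Spec_parse expr out) := by unfold Spec_parse; infer_instance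

-- ===== CLAIM (what is proved, stated in full; the proofs are below) =====
def Claim_equal_parse : Prop := ∀ (expr : String), Dom_parse expr → Spec_parse expr (parse expr)

-- ===== LEMMAS AND PROOFS =====

-- proof-only: A's finalization of the loop state
def finalize (st : Int × List Char × List String) : List String :=
  if st.2.1.isEmpty then st.2.2 else st.2.2 ++ [String.ofList st.2.1]

-- shifting the running index of splitFirstGo
theorem splitFirstGo_succ (s : List Char) : ∀ (bal : Int) (i : Nat),
    splitFirstGo bal (i + 1) s = (splitFirstGo bal i s).map (· + 1) := by
  induction s with
  | nil => intro bal i; simp [splitFirstGo]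
  | cons c rest ih =>
    intro bal i
    by_cases hc : (bal == 0 && c == ' ') = true
    · simp [splitFirstGo, hc]
    · simp only [splitFirstGo, hc, Bool.false_eq_true, if_false]
      exact ih _ _

-- A's two-step parenthesis update equals B's
theorem par_update_eq (par : Int) (c : Char) :
    (if c == '(' then (if c == ')' then par - 1 else par) + 1 else (if c == ')' then par - 1 else par))
      = (if c == ')' then (if c == '(' then par + 1 else par) - 1 else (if c == '(' then par + 1 else par)) := by
  by_cases h1 : (c == '(') = true <;> by_cases h2 : (c == ')') = true <;>
    simp_all

-- one-step unfolding of tokensLoop in terms of splitFirstGo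
theorem tokensLoop_eq (out : List String) (s : List Char) :
    tokensLoop out s =
    (match splitFirstGo 0 0 s with
     | none => if s.isEmpty then out else out ++ [String.ofList s]
     | some i => tokensLoop (out ++ [String.ofList (s.take i)]) (s.drop (i + 1))) := by
  rw [tokensLoop]
  cases hg : splitFirstGo 0 0 s with
  | none => split <;> simp_all [splitFirst]
  | some i =>
    split <;> simp_all [splitFirst]

-- main invariant: A's fold-with-state, finalized, equals B's cut-off-head loop
theorem main_loop (s : List Char) : ∀ (par : Int) (tok : List Char) (acc : List String),
    finalize (parseLoop par tok acc s) =
    (match splitFirstGo par 0 s with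
     | none => if (tok ++ s).isEmpty then acc else acc ++ [String.ofList (tok ++ s)]
     | some i => tokensLoop (acc ++ [String.ofList (tok ++ s.take i)]) (s.drop (i + 1))) := by
  induction s with
  | nil => intro par tok acc; simp [parseLoop, splitFirstGo, finalize]
  | cons c rest ih =>
    intro par tok acc
    by_cases hc : (par == 0 && c == ' ') = true
    · have hpar : par = 0 := beq_iff_eq.mp (Bool.and_elim_left hc)
      simp only [parseLoop, splitFirstGo, hc, if_true]
      rw [hpar]
      rw [ih 0 [] (acc ++ [String.ofList tok])]
      rw [tokensLoop_eq]
      simp only [List.take_zero, List.append_nil, List.drop_succ_cons, List.drop_zero]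
      cases splitFirstGo 0 0 rest <;> simp
    · simp only [parseLoop, splitFirstGo, hc, Bool.false_eq_true, if_false]
      rw [ih]
      rw [par_update_eq]
      rw [splitFirstGo_succ]
      cases hg : splitFirstGo (if c == ')' then (if c == '(' then par + 1 else par) - 1
          else (if c == '(' then par + 1 else par)) 0 rest with
      | none => simp
      | some j =>
        simp only [Option.map_some]
        simp [List.take_succ_cons, List.drop_succ_cons, List.append_assoc]

-- split₀ produces pieces free of whitespace characters
theorem split₀go_nospace : ∀ (rest cur : List Char) (acc : List (List Char)),
    (∀ c ∈ cur, PySem.Chars.isspace c = false) →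
    (∀ p ∈ acc, ∀ c ∈ p, PySem.Chars.isspace c = false) →
    ∀ p ∈ PySem.Chars.split₀.go rest cur acc, ∀ c ∈ p, PySem.Chars.isspace c = false := by
  intro rest
  induction rest with
  | nil =>
    intro cur acc hcur hacc p hp
    unfold PySem.Chars.split₀.go at hp
    by_cases hce : cur.isEmpty = true
    · simp [hce] at hp
      exact hacc p hp
    · simp [hce] at hp
      rcases hp with h | h
      · exact hacc p h
      · subst h; intro c hc; exact hcur c (List.mem_reverse.mp hc)
  | cons c rest ih =>
    intro cur acc hcur hacc p hp
    unfold PySem.Chars.split₀.go at hp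
    by_cases hs : PySem.Chars.isspace c = true
    · by_cases hce : cur.isEmpty = true
      · simp [hs, hce] at hp
        exact ih [] acc (by simp) hacc p hp
      · simp [hs, hce] at hp
        refine ih [] (cur.reverse :: acc) (by simp) ?_ p hp
        intro q hq
        rcases List.mem_cons.mp hq with h | h
        · subst h; intro d hd; exact hcur d (List.mem_reverse.mp hd)
        · exact hacc q h
    · simp [hs] at hp
      refine ih (c :: cur) acc ?_ hacc p hp
      intro d hd
      rcases List.mem_cons.mp hd with h | h
      · subst h; simpa using hs
      · exact hcur d h

theorem split₀_nospace (s : List Char) :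
    ∀ p ∈ PySem.Chars.split₀ s, ∀ c ∈ p, PySem.Chars.isspace c = false := by
  unfold PySem.Chars.split₀
  exact split₀go_nospace s [] [] (by simp) (by simp)

-- membership in a space-joined list of pieces
theorem mem_join_space (parts : List (List Char)) (c : Char)
    (h : c ∈ PySem.Chars.join [' '] parts) : c = ' ' ∨ ∃ p ∈ parts, c ∈ p := by
  induction parts with
  | nil => simp [PySem.Chars.join, List.intercalate] at h
  | cons p q ihq =>
    cases q with
    | nil =>
      simp [PySem.Chars.join, List.intercalate] at h
      exact Or.inr ⟨p, by simp, h⟩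
    | cons p2 r =>
      rw [show PySem.Chars.join [' '] (p :: p2 :: r) = p ++ [' '] ++ PySem.Chars.join [' '] (p2 :: r) by
        simp [PySem.Chars.join, List.intercalate, List.intersperse]] at h
      rcases List.mem_append.mp h with h1 | h2
      · rcases List.mem_append.mp h1 with ha | hb
        · exact Or.inr ⟨p, by simp, ha⟩
        · simp at hb; exact Or.inl hb
      · rcases ihq h2 with h3 | ⟨q', hq', hc⟩
        · exact Or.inl h3
        · exact Or.inr ⟨q', by simp [hq'], hc⟩

-- a whitespace character other than ' ' does not occur in the normalized string
theorem notmem_norm (s : List Char) (c : Char) (hs : PySem.Chars.isspace c = true)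
    (hne : c ≠ ' ') : c ∉ PySem.Chars.join [' '] (PySem.Chars.split₀ s) := by
  intro hmem
  rcases mem_join_space _ c hmem with h | ⟨p, hp, hc⟩
  · exact hne h
  · rw [split₀_nospace s p hp c hc] at hs; exact Bool.false_ne_true hs

-- replacing an absent single character is the identity
theorem replace_go_notmem (c d : Char) : ∀ (fuel : Nat) (l acc : List Char), c ∉ l →
    PySem.Chars.replace.go [c] [d] fuel l acc = acc.reverse ++ l := by
  intro fuel
  induction fuel with
  | zero => intro l acc _; unfold PySem.Chars.replace.go; rfl
  | succ n ih =>
    intro l acc hl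
    cases l with
    | nil => unfold PySem.Chars.replace.go; simp
    | cons ch t =>
      have hne : ch ≠ c := fun h => hl (by simp [h])
      unfold PySem.Chars.replace.go
      have hpre : [c].isPrefixOf (ch :: t) = false := by
        simp [List.isPrefixOf]; exact fun h => absurd h.symm hne
      rw [hpre]
      simp only [Bool.false_eq_true, if_false]
      rw [ih t (ch :: acc) (fun h => hl (by simp [h]))]
      simp

theorem replace_notmem (s : List Char) (c d : Char) (h : c ∉ s) :
    PySem.Chars.replace s [c] [d] = s := by
  unfold PySem.Chars.replace
  simp only [List.isEmpty_cons, Bool.false_eq_true, if_false]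
  rw [replace_go_notmem c d s.length s [] h]
  simp

-- ===== VERDICT (by name: the statement is the Claim_ definition above) =====
set_option maxHeartbeats 1000000 in
theorem parse_spec : Claim_equal_parse := by
  intro expr _
  unfold Spec_parse parse parse_alt
  have hN : (PySem.Str.join " " (PySem.Str.split₀ expr)).toList
      = PySem.Chars.join [' '] (PySem.Chars.split₀ expr.toList) := by
    simp only [PySem.Str.join, PySem.Str.split₀, String.toList_ofList, List.map_map]
    congr 1
    simp [Function.comp_def]
  have hE : (PySem.Str.replace (PySem.Str.replace
      (PySem.Str.join " " (PySem.Str.split₀ expr)) "\n" " ") "\t" " ").toList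
      = PySem.Chars.join [' '] (PySem.Chars.split₀ expr.toList) := by
    simp only [PySem.Str.replace, String.toList_ofList]
    rw [hN]
    rw [show ("\n".toList) = ['\n'] from rfl, show ("\t".toList) = ['\t'] from rfl,
        show (" ".toList) = [' '] from rfl]
    rw [replace_notmem _ '\n' ' ' (notmem_norm _ _ (by decide) (by decide))]
    rw [replace_notmem _ '\t' ' ' (notmem_norm _ _ (by decide) (by decide))]
  show finalize (parseLoop 0 [] []
      (PySem.Str.replace (PySem.Str.replace
        (PySem.Str.join " " (PySem.Str.split₀ expr)) "\n" " ") "\t" " ").toList)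
    = tokensLoop [] (PySem.Str.join " " (PySem.Str.split₀ expr)).toList
  rw [hE, hN]
  have := main_loop (PySem.Chars.join [' '] (PySem.Chars.split₀ expr.toList)) 0 [] []
  simp only [List.nil_append] at this
  rw [this]
  rw [tokensLoop_eq]
  cases splitFirstGo 0 0 (PySem.Chars.join [' '] (PySem.Chars.split₀ expr.toList)) <;> simp
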